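-- pv_equiv track=rewrite | github.com/NikitaLoik/mRNADisplayResults_Analysis | scripts_py/utility_functions.py | get_dna_appearance_by_cycle
-- ===== SOURCE A (Python) =====
-- def get_dna_appearance_by_cycle(
--         base_cycle_sorted_dna: list,
--         dna_counts_by_cycle):
--     '''
--     which returns for each dna in selection a list of cycles in which this dna appears:
--     {dna_x:    [cycle_1, ..., cycle_N]}
--     '''
--     dna_appearance_by_cycle = {}
--
--     for dna in base_cycle_sorted_dna:
--         dna_appearance_by_cycle[dna] = []
--         for cycle in dna_counts_by_cycle:
--             if dna in dna_counts_by_cycle[cycle]: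
--                 dna_appearance_by_cycle[dna] += [cycle]
--     return dna_appearance_by_cycle
-- ===== SOURCE B (Python) =====
-- def get_dna_appearance_by_cycle(
--         base_cycle_sorted_dna: list,
--         dna_counts_by_cycle):
--     # Inverted traversal: seed every selected dna with [], then walk the cycles
--     # once and append each cycle to the dnas that actually appear in it.
--     selected = set(base_cycle_sorted_dna)
--     dna_appearance_by_cycle = {dna: [] for dna in base_cycle_sorted_dna}
--     for cycle in dna_counts_by_cycle:
--         for dna in dna_counts_by_cycle[cycle]:
--             if dna in selected:
--                 dna_appearance_by_cycle[dna].append(cycle)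
--     return dna_appearance_by_cycle
-- ===== Notes on version B (the rewrite author's own statement) =====
-- stated objective: faster
-- what changed: Inverts the loop nesting: instead of rescanning every cycle's counts dict for each selected DNA, B seeds result[dna]=[] for all selected DNAs, builds a membership set, and walks each cycle's actual keys once, appending the cycle to the DNAs that appear.
import Mathlib
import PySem

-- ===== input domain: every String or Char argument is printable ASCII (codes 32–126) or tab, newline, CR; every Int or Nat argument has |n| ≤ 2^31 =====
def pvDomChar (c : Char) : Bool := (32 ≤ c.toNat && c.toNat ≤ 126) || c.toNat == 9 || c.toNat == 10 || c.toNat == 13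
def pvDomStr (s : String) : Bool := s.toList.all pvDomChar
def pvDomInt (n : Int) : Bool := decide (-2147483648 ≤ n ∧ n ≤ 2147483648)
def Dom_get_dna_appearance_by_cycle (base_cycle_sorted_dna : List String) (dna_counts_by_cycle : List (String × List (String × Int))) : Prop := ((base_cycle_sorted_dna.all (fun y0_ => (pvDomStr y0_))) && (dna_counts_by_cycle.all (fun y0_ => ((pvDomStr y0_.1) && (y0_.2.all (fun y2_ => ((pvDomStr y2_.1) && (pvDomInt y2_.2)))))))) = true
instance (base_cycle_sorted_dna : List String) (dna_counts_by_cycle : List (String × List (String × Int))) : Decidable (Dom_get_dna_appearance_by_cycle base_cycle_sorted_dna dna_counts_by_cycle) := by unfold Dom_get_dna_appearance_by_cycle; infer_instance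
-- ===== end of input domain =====

-- B inverts A's loop nesting (seed all selected DNAs, then walk each cycle's keys once); return values proved equal.

-- ===== PORT A =====
-- A: for each selected dna, start its list at [] and scan every cycle, testing key
-- membership 'dna in dna_counts_by_cycle[cycle]' in that cycle's counts dict.
-- (iterating the dict and subscripting by the iterated key visits each (key, value) item;
-- 'dna in <inner dict>' is key membership, ported as .any on the inner items' keys)
def get_dna_appearance_by_cycle (base_cycle_sorted_dna : List String) (dna_counts_by_cycle : List (String × List (String × Int))) : List (String × List String) :=
  (base_cycle_sorted_dna.foldl (fun d dna =>
      dna_counts_by_cycle.foldl (fun d cv =>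
          if cv.2.any (fun p => p.1 == dna) then d.insert dna (d.getD dna [] ++ [cv.1]) else d)
        (d.insert dna []))
    PySem.Dict.empty).items

-- ===== PORT B =====
-- B: membership set + pre-seeded result dict, then one pass over the cycles appending
-- each cycle to the dnas appearing in it ('for dna in counts' iterates the inner dict's
-- distinct keys, ported as PySem.List.dedup of the inner items' keys).
def get_dna_appearance_by_cycle_alt (base_cycle_sorted_dna : List String) (dna_counts_by_cycle : List (String × List (String × Int))) : List (String × List String) :=
  let selected := PySem.Set.ofList base_cycle_sorted_dna
  let seed := base_cycle_sorted_dna.foldl (fun d dna => d.insert dna ([] : List String)) PySem.Dict.empty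
  (dna_counts_by_cycle.foldl (fun d cv =>
      (PySem.List.dedup (cv.2.map Prod.fst)).foldl (fun d dna =>
          if PySem.Set.contains selected dna then d.modify dna [] (fun l => l ++ [cv.1]) else d)
        d)
    seed).items

-- ===== PRECONDITION & SPEC =====
def Spec_get_dna_appearance_by_cycle (base_cycle_sorted_dna : List String) (dna_counts_by_cycle : List (String × List (String × Int))) (out : List (String × List String)) : Prop := out = get_dna_appearance_by_cycle_alt base_cycle_sorted_dna dna_counts_by_cycle
instance (base_cycle_sorted_dna : List String) (dna_counts_by_cycle : List (String × List (String × Int))) (out : List (String × List String)) : Decidable (Spec_get_dna_appearance_by_cycle base_cycle_sorted_dna dna_counts_by_cycle out) := by unfold Spec_get_dna_appearance_by_cycle; infer_instance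

-- ===== CLAIM (what is proved, stated in full; the proofs are below) =====
def Claim_equal_get_dna_appearance_by_cycle : Prop := ∀ (base_cycle_sorted_dna : List String) (dna_counts_by_cycle : List (String × List (String × Int))), Dom_get_dna_appearance_by_cycle base_cycle_sorted_dna dna_counts_by_cycle → Spec_get_dna_appearance_by_cycle base_cycle_sorted_dna dna_counts_by_cycle (get_dna_appearance_by_cycle base_cycle_sorted_dna dna_counts_by_cycle)

-- ===== LEMMAS AND PROOFS =====

-- the list of cycles in which dna k appears (the common value both ports compute per key)
def pvF (dna_counts_by_cycle : List (String × List (String × Int))) (k : String) : List String :=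
  (dna_counts_by_cycle.filter (fun cv => cv.2.any (fun p => p.1 == k))).map Prod.fst

-- overwriting a key with the value it already has leaves the dict unchanged
lemma pv_insert_self (d : PySem.Dict String (List String)) (k : String) (v : List String)
    (hnd : d.keys.Nodup) (h : d.get? k = some v) : d.insert k v = d := by
  apply PySem.Dict.ext
  have hc : d.contains k = true := by rw [PySem.Dict.contains_eq_isSome_get?, h]; rfl
  rw [PySem.Dict.items_insert_of_contains d v hc]
  conv_rhs => rw [← List.map_id d.items]
  apply List.map_congr_left
  intro p hp
  by_cases hk : (p.1 == k) = true
  · have hk' : p.1 = k := by simpa using hk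
    have hv : d.get? k = some p.2 := PySem.Dict.get?_of_mem_items d (by rw [← hk']; exact hp) hnd
    rw [h] at hv
    have hv' : p.2 = v := by injection hv with hv'; exact hv'.symm
    simp [← hk', ← hv']
  · simp [hk]

-- A's inner loop over the cycles, started at a dict where dna ↦ v, just overwrites dna's value
lemma pvA_inner (dna_counts_by_cycle : List (String × List (String × Int))) (dna : String) :
    ∀ (d : PySem.Dict String (List String)) (v : List String), d.keys.Nodup → d.get? dna = some v →
    dna_counts_by_cycle.foldl (fun d cv =>
        if cv.2.any (fun p => p.1 == dna) then d.insert dna (d.getD dna [] ++ [cv.1]) else d) d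
      = d.insert dna (v ++ pvF dna_counts_by_cycle dna) := by
  induction dna_counts_by_cycle with
  | nil =>
    intro d v hnd h
    simp [pvF, pv_insert_self d dna v hnd h]
  | cons cv rest ih =>
    intro d v hnd h
    simp only [List.foldl_cons]
    by_cases hh : cv.2.any (fun p => p.1 == dna) = true
    · rw [if_pos hh, PySem.Dict.getD_of_get?_eq_some d [] h,
        ih (d.insert dna (v ++ [cv.1])) (v ++ [cv.1]) (PySem.Dict.nodup_keys_insert d dna _ hnd)
          (PySem.Dict.get?_insert_self d dna _),
        PySem.Dict.insert_insert_self]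
      simp [pvF, hh]
    · rw [if_neg hh, ih d v hnd h]
      simp [pvF, hh]

-- hence A's whole loop is a fold of single inserts of the final per-key values
lemma pvA_eq (dna_counts_by_cycle : List (String × List (String × Int))) :
    ∀ (base : List String) (d : PySem.Dict String (List String)), d.keys.Nodup →
    base.foldl (fun d dna =>
        dna_counts_by_cycle.foldl (fun d cv =>
            if cv.2.any (fun p => p.1 == dna) then d.insert dna (d.getD dna [] ++ [cv.1]) else d)
          (d.insert dna [])) d
      = base.foldl (fun d dna => d.insert dna (pvF dna_counts_by_cycle dna)) d := by
  intro base
  induction base with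
  | nil => intro d _; rfl
  | cons dna rest ih =>
    intro d hnd
    simp only [List.foldl_cons]
    rw [pvA_inner dna_counts_by_cycle dna (d.insert dna []) [] (PySem.Dict.nodup_keys_insert d dna _ hnd)
        (PySem.Dict.get?_insert_self d dna _),
      PySem.Dict.insert_insert_self, List.nil_append]
    exact ih _ (PySem.Dict.nodup_keys_insert d dna _ hnd)

-- lookup through a fold of inserts whose value depends only on the key
lemma pvC_getD (F : String → List String) :
    ∀ (l : List String) (d : PySem.Dict String (List String)) (k : String),
    (l.foldl (fun d x => d.insert x (F x)) d).getD k [] = if k ∈ l then F k else d.getD k [] := by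
  intro l
  induction l with
  | nil => intro d k; simp
  | cons x rest ih =>
    intro d k
    simp only [List.foldl_cons]
    rw [ih]
    by_cases hm : k ∈ rest
    · simp [hm]
    · by_cases hk : k = x
      · subst hk; simp [hm, PySem.Dict.getD_insert_self]
      · simp [hm, hk, PySem.Dict.getD_insert_of_ne d _ _ hk]

-- B's inner loop (over one cycle's distinct keys) keeps the key list unchanged …
lemma pvB_keys_inner (S : PySem.Set String) (c : String) :
    ∀ (ks : List String) (d : PySem.Dict String (List String)),
    (∀ j, PySem.Set.contains S j = true → d.contains j = true) →
    (ks.foldl (fun d j => if PySem.Set.contains S j then d.modify j [] (fun l => l ++ [c]) else d) d).keys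
      = d.keys := by
  intro ks
  induction ks with
  | nil => intro d _; rfl
  | cons j rest ih =>
    intro d hinv
    simp only [List.foldl_cons]
    by_cases hj : PySem.Set.contains S j = true
    · rw [if_pos hj]
      have hkeys : (d.modify j [] (fun l => l ++ [c])).keys = d.keys := by
        rw [PySem.Dict.keys_modify, PySem.Dict.keys_insert_of_contains d _ (hinv j hj)]
      rw [ih _ (fun i hi => by
        rw [PySem.Dict.contains_iff_mem_keys, hkeys, ← PySem.Dict.contains_iff_mem_keys]
        exact hinv i hi)]
      exact hkeys
    · rw [if_neg hj]; exact ih d hinv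

-- … and extends the value at key k by [c] exactly when k is one of them and selected
lemma pvB_getD_inner (S : PySem.Set String) (c : String) (k : String) :
    ∀ (ks : List String), ks.Nodup → ∀ (d : PySem.Dict String (List String)),
    (ks.foldl (fun d j => if PySem.Set.contains S j then d.modify j [] (fun l => l ++ [c]) else d) d).getD k []
      = d.getD k [] ++ (if k ∈ ks ∧ PySem.Set.contains S k = true then [c] else []) := by
  intro ks
  induction ks with
  | nil => intro _ d; simp
  | cons j rest ih =>
    intro hnd d
    rcases List.nodup_cons.mp hnd with ⟨hjrest, hnd'⟩
    simp only [List.foldl_cons]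
    by_cases hj : PySem.Set.contains S j = true
    · rw [if_pos hj, ih hnd']
      by_cases hk : k = j
      · subst hk
        have hkS : k ∈ S := by simpa [PySem.Set.contains] using hj
        rw [PySem.Dict.getD_modify_self]
        simp [hjrest, hkS]
      · rw [PySem.Dict.getD_modify_of_ne d [] _ hk]
        simp [List.mem_cons, hk]
    · rw [if_neg hj, ih hnd']
      by_cases hk : k = j
      · subst hk
        have hkS : k ∉ S := by simpa [PySem.Set.contains] using hj
        simp [hkS]
      · simp [List.mem_cons, hk]

-- B's outer loop appends, to each selected key, exactly the cycles in which it appears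
lemma pvB_getD (S : PySem.Set String) (k : String) (hk : PySem.Set.contains S k = true) :
    ∀ (dna_counts_by_cycle : List (String × List (String × Int))) (d : PySem.Dict String (List String)),
    (∀ j, PySem.Set.contains S j = true → d.contains j = true) →
    (dna_counts_by_cycle.foldl (fun d cv =>
        (PySem.List.dedup (cv.2.map Prod.fst)).foldl (fun d dna =>
            if PySem.Set.contains S dna then d.modify dna [] (fun l => l ++ [cv.1]) else d) d) d).getD k []
      = d.getD k [] ++ pvF dna_counts_by_cycle k := by
  intro l
  induction l with
  | nil => intro d _; simp [pvF]
  | cons cv rest ih =>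
    intro d hinv
    simp only [List.foldl_cons]
    have hinv' : ∀ j, PySem.Set.contains S j = true →
        ((PySem.List.dedup (cv.2.map Prod.fst)).foldl (fun d dna =>
            if PySem.Set.contains S dna then d.modify dna [] (fun l => l ++ [cv.1]) else d) d).contains j = true := by
      intro j hj
      rw [PySem.Dict.contains_iff_mem_keys, pvB_keys_inner S cv.1 _ d hinv,
        ← PySem.Dict.contains_iff_mem_keys]
      exact hinv j hj
    rw [ih _ hinv', pvB_getD_inner S cv.1 k _ (PySem.List.nodup_dedup _) d]
    have hmem : (k ∈ PySem.List.dedup (cv.2.map Prod.fst)) ↔ (cv.2.any (fun p => p.1 == k) = true) := by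
      rw [PySem.List.mem_dedup, List.any_eq_true]
      constructor
      · intro h
        rcases List.mem_map.mp h with ⟨p, hp, he⟩
        exact ⟨p, hp, by simp [he]⟩
      · rintro ⟨p, hp, he⟩
        exact List.mem_map.mpr ⟨p, hp, by simpa using he⟩
    rw [List.append_assoc]
    congr 1
    by_cases hh : cv.2.any (fun p => p.1 == k) = true
    · rw [if_pos ⟨hmem.mpr hh, hk⟩]
      simp [pvF, hh]
    · rw [if_neg (fun hc => hh (hmem.mp hc.1))]
      simp [pvF, hh]

-- B's outer loop keeps the seeded key list
lemma pvB_keys (S : PySem.Set String) :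
    ∀ (dna_counts_by_cycle : List (String × List (String × Int))) (d : PySem.Dict String (List String)),
    (∀ j, PySem.Set.contains S j = true → d.contains j = true) →
    (dna_counts_by_cycle.foldl (fun d cv =>
        (PySem.List.dedup (cv.2.map Prod.fst)).foldl (fun d dna =>
            if PySem.Set.contains S dna then d.modify dna [] (fun l => l ++ [cv.1]) else d) d) d).keys
      = d.keys := by
  intro l
  induction l with
  | nil => intro d _; rfl
  | cons cv rest ih =>
    intro d hinv
    simp only [List.foldl_cons]
    have hk1 := pvB_keys_inner S cv.1 (PySem.List.dedup (cv.2.map Prod.fst)) d hinv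
    rw [ih _ (fun j hj => by
      rw [PySem.Dict.contains_iff_mem_keys, hk1, ← PySem.Dict.contains_iff_mem_keys]
      exact hinv j hj)]
    exact hk1

-- ===== VERDICT (by name: the statement is the Claim_ definition above) =====
theorem get_dna_appearance_by_cycle_spec : Claim_equal_get_dna_appearance_by_cycle := by
  intro base cycles _
  unfold Spec_get_dna_appearance_by_cycle get_dna_appearance_by_cycle get_dna_appearance_by_cycle_alt
  have hSc : ∀ j, PySem.Set.contains (PySem.Set.ofList base) j = true ↔ j ∈ base := by
    intro j; simp [PySem.Set.contains, PySem.Set.mem_ofList]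
  -- A's dict is the canonical fold of inserts
  rw [pvA_eq cycles base PySem.Dict.empty (by simp [PySem.Dict.keys_empty])]
  -- key lists of both final dicts
  have hkeysA : (base.foldl (fun d dna => d.insert dna (pvF cycles dna)) PySem.Dict.empty).keys
      = PySem.Set.ofList base := by
    rw [PySem.Dict.keys_foldl_insert base (fun _ dna => pvF cycles dna) PySem.Dict.empty]
    rfl
  have hndA : (base.foldl (fun d dna => d.insert dna (pvF cycles dna)) PySem.Dict.empty).keys.Nodup :=
    PySem.Dict.nodup_keys_foldl_insert base _ PySem.Dict.empty (by simp [PySem.Dict.keys_empty])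
  have hkeysSeed : (base.foldl (fun d dna => d.insert dna ([] : List String)) PySem.Dict.empty).keys
      = PySem.Set.ofList base := by
    rw [PySem.Dict.keys_foldl_insert base (fun _ _ => ([] : List String)) PySem.Dict.empty]
    rfl
  have hndSeed : (base.foldl (fun d dna => d.insert dna ([] : List String)) PySem.Dict.empty).keys.Nodup :=
    PySem.Dict.nodup_keys_foldl_insert base _ PySem.Dict.empty (by simp [PySem.Dict.keys_empty])
  have hinv0 : ∀ j, PySem.Set.contains (PySem.Set.ofList base) j = true →
      (base.foldl (fun d dna => d.insert dna ([] : List String)) PySem.Dict.empty).contains j = true := by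
    intro j hj
    rw [PySem.Dict.contains_iff_mem_keys, hkeysSeed]
    exact PySem.Set.mem_ofList base j |>.mpr ((hSc j).mp hj)
  have hkeysB : (cycles.foldl (fun d cv =>
        (PySem.List.dedup (cv.2.map Prod.fst)).foldl (fun d dna =>
            if PySem.Set.contains (PySem.Set.ofList base) dna then d.modify dna [] (fun l => l ++ [cv.1]) else d) d)
      (base.foldl (fun d dna => d.insert dna ([] : List String)) PySem.Dict.empty)).keys
      = PySem.Set.ofList base := by
    rw [pvB_keys (PySem.Set.ofList base) cycles _ hinv0, hkeysSeed]
  have hndB : (cycles.foldl (fun d cv =>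
        (PySem.List.dedup (cv.2.map Prod.fst)).foldl (fun d dna =>
            if PySem.Set.contains (PySem.Set.ofList base) dna then d.modify dna [] (fun l => l ++ [cv.1]) else d) d)
      (base.foldl (fun d dna => d.insert dna ([] : List String)) PySem.Dict.empty)).keys.Nodup := by
    rw [pvB_keys (PySem.Set.ofList base) cycles _ hinv0]
    exact hndSeed
  -- compare items via items_eq_map_keys
  rw [PySem.Dict.items_eq_map_keys _ hndA ([] : List String),
    PySem.Dict.items_eq_map_keys _ hndB ([] : List String), hkeysA, hkeysB]
  apply List.map_congr_left
  intro k hkS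
  have hkbase : k ∈ base := (PySem.Set.mem_ofList base k).mp hkS
  have hA : (base.foldl (fun d dna => d.insert dna (pvF cycles dna)) PySem.Dict.empty).getD k []
      = pvF cycles k := by
    rw [pvC_getD (fun x => pvF cycles x) base PySem.Dict.empty k]; simp [hkbase]
  have hB := pvB_getD (PySem.Set.ofList base) k ((hSc k).mpr hkbase) cycles _ hinv0
  have hseedD : (base.foldl (fun d dna => d.insert dna ([] : List String)) PySem.Dict.empty).getD k []
      = [] := by
    rw [pvC_getD (fun _ => ([] : List String)) base PySem.Dict.empty k]; simp
  rw [hA, hB, hseedD, List.nil_append]
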